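-- pv_equiv track=rewrite | github.com/gtripti/PythonBasics | Methods and functions/Functions.py | summer_of_69
-- ===== SOURCE A (Python) =====
-- def summer_of_69(arr):
--     total = 0
--     add = True
--     for num in arr :
--         while add :
--             if num != 6:
--                 total += num
--                 break
--             else:
--                 add = False
--         while not add :
--             if num != 9 :
--                 break
--             else:
--                 add = True
--                 break
--     return total
-- ===== SOURCE B (Python) =====
-- def summer_of_69(arr):
--     total = 0
--     i = 0
--     n = len(arr)
--     while i < n:
--         if arr[i] == 6:
--             while i < n and arr[i] != 9:
--                 i += 1
--             i += 1  # step past the closing 9 (or past the end)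
--         else:
--             total += arr[i]
--             i += 1
--     return total
-- ===== Notes on version B (the rewrite author's own statement) =====
-- stated objective: alternative
-- what changed: Replaced the flag-threaded single pass (a boolean 'add' carried through every element) with an index-based outer loop over segments that, on seeing a 6, runs an explicit inner skip-ahead loop to just past the matching 9.
import Mathlib
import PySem

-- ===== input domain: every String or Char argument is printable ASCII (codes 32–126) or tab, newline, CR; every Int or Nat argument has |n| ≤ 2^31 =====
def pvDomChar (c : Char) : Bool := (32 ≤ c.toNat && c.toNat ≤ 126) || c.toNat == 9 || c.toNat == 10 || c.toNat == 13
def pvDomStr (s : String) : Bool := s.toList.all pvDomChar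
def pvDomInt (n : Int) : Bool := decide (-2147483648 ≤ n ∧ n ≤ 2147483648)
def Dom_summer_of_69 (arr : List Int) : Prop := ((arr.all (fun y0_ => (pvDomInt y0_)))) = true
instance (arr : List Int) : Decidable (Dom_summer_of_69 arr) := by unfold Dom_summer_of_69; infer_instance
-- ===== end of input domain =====

-- B replaces A's flag-threaded single pass with an index-based segment scan (explicit inner
-- skip-ahead loop past each 6..9 section); same cost, different decomposition.

-- ===== PORT A =====
-- one iteration of A's for-body: the first 'while add' runs at most one effective step
-- (break, or add:=False then the condition fails), the second 'while not add' likewise.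
def stepA (st : Int × Bool) (num : Int) : Int × Bool :=
  let s1 := if st.2 then (if num ≠ 6 then (st.1 + num, st.2) else (st.1, false)) else st
  if ¬ s1.2 then (if num = 9 then (s1.1, true) else s1) else s1

def summer_of_69 (arr : List Int) : Int :=
  (arr.foldl stepA (0, true)).1

-- ===== PORT B =====
-- inner skip loop: 'while i < n and arr[i] != 9: i += 1' followed by 'i += 1'.
-- arr[i] is guarded by i < n in B, so List.getD is exact here.
def pvSkip (arr : List Int) (i : Nat) : Nat :=
  if h : i < arr.length ∧ arr.getD i 0 ≠ 9 then pvSkip arr (i + 1) else i + 1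
termination_by arr.length - i
decreasing_by omega

theorem pvSkip_gt (arr : List Int) (i : Nat) : i < pvSkip arr i := by
  unfold pvSkip
  split
  · have := pvSkip_gt arr (i + 1); omega
  · omega
termination_by arr.length - i
decreasing_by omega

-- outer 'while i < n' loop of B
def loopB (arr : List Int) (i : Nat) : Int :=
  if _h : i < arr.length then
    if arr.getD i 0 = 6 then loopB arr (pvSkip arr i)
    else arr.getD i 0 + loopB arr (i + 1)
  else 0
termination_by arr.length - i
decreasing_by
  · have := pvSkip_gt arr i; omega
  · omega

def summer_of_69_alt (arr : List Int) : Int := loopB arr 0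

-- ===== PRECONDITION & SPEC =====
def Spec_summer_of_69 (arr : List Int) (out : Int) : Prop := out = summer_of_69_alt arr
instance (arr : List Int) (out : Int) : Decidable (Spec_summer_of_69 arr out) := by unfold Spec_summer_of_69; infer_instance

-- ===== CLAIM (what is proved, stated in full; the proofs are below) =====
def Claim_equal_summer_of_69 : Prop := ∀ (arr : List Int), Dom_summer_of_69 arr → Spec_summer_of_69 arr (summer_of_69 arr)

-- ===== LEMMAS AND PROOFS =====

-- stepA's total component is additive in the incoming total, and the flag ignores it
theorem stepA_shift (t : Int) (add : Bool) (num : Int) :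
    stepA (t, add) num = (t + (stepA (0, add) num).1, (stepA (0, add) num).2) := by
  simp only [stepA]
  cases add <;> split_ifs <;> simp

theorem foldl_stepA_shift (l : List Int) (t : Int) (add : Bool) :
    l.foldl stepA (t, add) =
      (t + (l.foldl stepA (0, add)).1, (l.foldl stepA (0, add)).2) := by
  induction l generalizing t add with
  | nil => simp
  | cons x xs ih =>
    simp only [List.foldl_cons]
    rw [stepA_shift t add x]
    rw [ih (t + (stepA (0, add) x).1) ((stepA (0, add) x).2)]
    rw [show stepA (0, add) x = ((stepA (0, add) x).1, (stepA (0, add) x).2) from rfl,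
        ih (stepA (0, add) x).1 ((stepA (0, add) x).2)]
    simp [add_assoc]

-- combined invariant: A's fold over the suffix from i, in state add, equals B's scan
-- resumed at i (add = true) or at the index just past the closing 9 (add = false)
theorem fold_eq_loopB (arr : List Int) (i : Nat) (add : Bool) :
    ((arr.drop i).foldl stepA (0, add)).1 =
      cond add (loopB arr i) (loopB arr (pvSkip arr i)) := by
  by_cases h : i < arr.length
  · have hdrop : arr.drop i = arr[i] :: arr.drop (i + 1) := List.drop_eq_getElem_cons h
    have hgetD : arr.getD i 0 = arr[i] := List.getD_eq_getElem arr 0 h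
    have ih := fun add => fold_eq_loopB arr (i + 1) add
    cases add with
    | true =>
      by_cases h6 : arr[i] = 6
      · have hstep : stepA (0, true) arr[i] = (0, false) := by
          simp [stepA, h6]
        have hskip : pvSkip arr i = pvSkip arr (i + 1) := by
          rw [pvSkip, dif_pos (⟨h, by rw [hgetD, h6]; decide⟩ :
            i < arr.length ∧ arr.getD i 0 ≠ 9)]
        rw [hdrop]
        simp only [List.foldl_cons, hstep, ih false, Bool.cond_false, Bool.cond_true]
        conv_rhs => rw [loopB]
        rw [dif_pos h, if_pos (show arr.getD i 0 = 6 by rw [hgetD, h6]), hskip]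
      · have hstep : stepA (0, true) arr[i] = (arr[i], true) := by
          simp [stepA, h6]
        have ht := ih true
        simp only [Bool.cond_true] at ht
        rw [hdrop]
        simp only [List.foldl_cons, hstep, Bool.cond_true]
        rw [foldl_stepA_shift]
        simp only [ht]
        conv_rhs => rw [loopB]
        rw [dif_pos h, if_neg (show ¬ arr.getD i 0 = 6 by rw [hgetD]; exact h6), hgetD]
    | false =>
      by_cases h9 : arr[i] = 9
      · have hstep : stepA (0, false) arr[i] = (0, true) := by
          simp [stepA, h9]
        have hskip : pvSkip arr i = i + 1 := by
          rw [pvSkip, dif_neg (show ¬ (i < arr.length ∧ arr.getD i 0 ≠ 9) by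
            rw [hgetD, h9]; simp)]
        rw [hdrop]
        simp only [List.foldl_cons, hstep, ih true, Bool.cond_true, Bool.cond_false]
        rw [hskip]
      · have hstep : stepA (0, false) arr[i] = (0, false) := by
          simp [stepA, h9]
        have hskip : pvSkip arr i = pvSkip arr (i + 1) := by
          rw [pvSkip, dif_pos (⟨h, by rw [hgetD]; exact h9⟩ :
            i < arr.length ∧ arr.getD i 0 ≠ 9)]
        rw [hdrop]
        simp only [List.foldl_cons, hstep, ih false, Bool.cond_false]
        rw [hskip]
  · have hdrop : arr.drop i = ([] : List Int) := List.drop_eq_nil_of_le (by omega)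
    have hloop : loopB arr i = 0 := by rw [loopB, dif_neg h]
    have hskipge : arr.length ≤ pvSkip arr i := by
      rw [pvSkip, dif_neg (by omega)]; omega
    have hloop2 : loopB arr (pvSkip arr i) = 0 := by
      rw [loopB, dif_neg (by omega)]
    rw [hdrop]
    cases add <;> simp [hloop, hloop2]
termination_by arr.length - i
decreasing_by all_goals omega

-- ===== VERDICT (by name: the statement is the Claim_ definition above) =====
theorem summer_of_69_spec : Claim_equal_summer_of_69 := by
  intro arr _
  unfold Spec_summer_of_69 summer_of_69 summer_of_69_alt
  have := fold_eq_loopB arr 0 true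
  simpa using this
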